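-- pv_equiv track=rewrite | github.com/TsinghuaDatabaseGroup/DB-GPT | multiagents/localized_llms/inference.py | refine_messages
-- ===== SOURCE A (Python) =====
-- def refine_messages(messages, mark_idx):
--     if mark_idx == 4 or mark_idx == 5:
--         return [messages[0], {"role": "user", "content": 'Diagnosed Root Causes: ' + messages[1]["content"] + '\n\n' + messages[2]["content"]}]
--
--     if mark_idx == 7:
--         if messages[1]["role"] != "assistant":
--             return messages
--
--         return [messages[0], {"role": "user", "content": '# Diagnosis Results\n\n' + '\n\n'.join([m["content"] for m in messages[1:]])}]
--
--     if mark_idx == 8 or mark_idx == 9 or mark_idx == 10: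
--         return [messages[0], {"role": "user", "content": '\n\n'.join([m["content"] for m in messages[1:]])}]
--
--     new_messages = []
--     cnt = 0
--     contents = []
--     flag = False
--     for message in messages:
--         if message["role"] == "assistant":
--             cnt += 1
--             if len(contents) > 0 and contents[-1].startswith("Thought: ") and contents[-1].find("Observation: ") == -1:
--                 contents[-1] += "\nObservation: " + message["content"]
--             else:
--                 contents.append(message["content"])
--         else:
--             if cnt > 0:
--                 new_messages.append({"role": "assistant", "content": "\n\n".join(contents)})
--                 flag |= (cnt > 1)
--             cnt = 0
--             contents = []
--             new_messages.append(message)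
--     if cnt > 0:
--         new_messages.append({"role": "assistant", "content": "\n\n".join(contents)})
--         flag |= (cnt > 1)
--     return new_messages if flag else messages
-- ===== SOURCE B (Python) =====
-- # B: staged final branch — first decide with a pairwise any/zip scan whether any two
-- # consecutive messages are both assistant (A's flag), and only then rebuild the list
-- # recursively, one leading block at a time, merging run contents with a greedy
-- # pairwise Thought/Observation rule; guard branches kept verbatim. Objective: alternative.
--
-- def _merge(cs):
--     # greedy pairwise Thought/Observation merge (a merged entry contains
--     # "Observation: ", so it can never absorb a further element)
--     if not cs:
--         return []
--     h = cs[0]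
--     if h.startswith("Thought: ") and h.find("Observation: ") == -1:
--         if len(cs) == 1:
--             return [h]
--         return [h + "\nObservation: " + cs[1]] + _merge(cs[2:])
--     return [h] + _merge(cs[1:])
--
-- def _rebuild(msgs):
--     if not msgs:
--         return []
--     if msgs[0]["role"] != "assistant":
--         return [msgs[0]] + _rebuild(msgs[1:])
--     i = 1
--     while i < len(msgs) and msgs[i]["role"] == "assistant":
--         i += 1
--     contents = _merge([m["content"] for m in msgs[:i]])
--     return [{"role": "assistant", "content": "\n\n".join(contents)}] + _rebuild(msgs[i:])
--
-- def refine_messages(messages, mark_idx):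
--     if mark_idx == 4 or mark_idx == 5:
--         return [messages[0], {"role": "user", "content": 'Diagnosed Root Causes: ' + messages[1]["content"] + '\n\n' + messages[2]["content"]}]
--
--     if mark_idx == 7:
--         if messages[1]["role"] != "assistant":
--             return messages
--         return [messages[0], {"role": "user", "content": '# Diagnosis Results\n\n' + '\n\n'.join(m["content"] for m in messages[1:])}]
--
--     if mark_idx in (8, 9, 10):
--         return [messages[0], {"role": "user", "content": '\n\n'.join(m["content"] for m in messages[1:])}]
--
--     # Stage 1: rebuilding changes something iff two consecutive messages are both assistant.
--     if not any(a["role"] == "assistant" and b["role"] == "assistant"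
--                for a, b in zip(messages, messages[1:])):
--         return messages
--     # Stage 2: rebuild recursively.
--     return _rebuild(messages)
-- ===== Notes on version B (the rewrite author's own statement) =====
-- stated objective: alternative
-- what changed: The final branch is split into two stages: a pairwise zip/any scan over adjacent messages first decides whether anything would merge (A's flag holds iff two consecutive messages are both assistant), returning the original list if not; only then is the list rebuilt by structural recursion, one leading block at a time, compressing each assistant block with a greedy pairwise Thought/Observation merge instead of A's single loop threading (cnt, contents, flag) state.
import Mathlib
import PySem

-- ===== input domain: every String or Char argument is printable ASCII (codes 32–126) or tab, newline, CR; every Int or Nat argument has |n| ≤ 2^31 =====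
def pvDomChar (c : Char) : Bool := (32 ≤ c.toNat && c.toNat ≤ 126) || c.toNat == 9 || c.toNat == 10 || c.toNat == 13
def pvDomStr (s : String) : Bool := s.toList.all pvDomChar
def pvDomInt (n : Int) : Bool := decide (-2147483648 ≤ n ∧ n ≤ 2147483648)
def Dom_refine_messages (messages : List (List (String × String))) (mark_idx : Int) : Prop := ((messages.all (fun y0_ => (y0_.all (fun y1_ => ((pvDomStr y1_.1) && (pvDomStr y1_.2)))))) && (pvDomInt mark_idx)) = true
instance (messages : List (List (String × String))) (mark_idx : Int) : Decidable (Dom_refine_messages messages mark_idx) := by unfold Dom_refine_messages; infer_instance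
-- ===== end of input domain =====

-- B restages the final branch: a pairwise adjacent scan first decides whether anything
-- would merge; only then the list is rebuilt by structural recursion with a greedy
-- pairwise Thought/Observation merge. Same return value; objective: alternative.


-- shared primitive helpers (the same dict lookups / string tests appear textually in both Pythons)
def pvRole (m : List (String × String)) : String := PySem.Dict.getD (PySem.Dict.mk m) "role" ""
def pvContent (m : List (String × String)) : String := PySem.Dict.getD (PySem.Dict.mk m) "content" ""
def pvJoin (l : List String) : String := PySem.Str.join "\n\n" l
def pvAsst (contents : List String) : List (String × String) :=
  [("role", "assistant"), ("content", pvJoin contents)]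
-- s.startswith("Thought: ") and s.find("Observation: ") == -1
def pvQual (s : String) : Bool :=
  PySem.Str.startswith s "Thought: " && (PySem.Str.find s "Observation: " == -1)

-- ===== PORT A =====
-- the body of A's loop applied to contents for one assistant content c
def pvMergeStep (contents : List String) (c : String) : List String :=
  if contents.length > 0 && pvQual (contents.getLastD "") then
    contents.dropLast ++ [(contents.getLastD "") ++ "\nObservation: " ++ c]
  else
    contents ++ [c]

-- state (new_messages, cnt, contents, flag)
def pvStepA (st : List (List (String × String)) × Int × List String × Bool)
    (message : List (String × String)) :
    List (List (String × String)) × Int × List String × Bool :=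
  let (nm, cnt, contents, flag) := st
  if pvRole message == "assistant" then
    (nm, cnt + 1, pvMergeStep contents (pvContent message), flag)
  else
    if cnt > 0 then
      ((nm ++ [pvAsst contents]) ++ [message], 0, [], flag || decide (cnt > 1))
    else
      (nm ++ [message], 0, [], flag)

def refine_messages (messages : List (List (String × String))) (mark_idx : Int) : List (List (String × String)) :=
  if mark_idx == 4 || mark_idx == 5 then
    [PySem.List.pyGetD messages 0 [],
     [("role", "user"), ("content", "Diagnosed Root Causes: " ++ pvContent (PySem.List.pyGetD messages 1 []) ++ "\n\n" ++ pvContent (PySem.List.pyGetD messages 2 []))]]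
  else if mark_idx == 7 then
    if pvRole (PySem.List.pyGetD messages 1 []) != "assistant" then messages
    else
      [PySem.List.pyGetD messages 0 [],
       [("role", "user"), ("content", "# Diagnosis Results\n\n" ++ pvJoin ((PySem.List.slice messages (some 1) none).map pvContent))]]
  else if mark_idx == 8 || mark_idx == 9 || mark_idx == 10 then
    [PySem.List.pyGetD messages 0 [],
     [("role", "user"), ("content", pvJoin ((PySem.List.slice messages (some 1) none).map pvContent))]]
  else
    let (nm, cnt, contents, flag) := messages.foldl pvStepA ([], 0, [], false)
    let nm := if cnt > 0 then nm ++ [pvAsst contents] else nm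
    let flag := if cnt > 0 then flag || decide (cnt > 1) else flag
    if flag then nm else messages

-- ===== PORT B =====
def pvKey (m : List (String × String)) : Bool := pvRole m == "assistant"

-- _merge: greedy pairwise Thought/Observation merge
def pvGreedy : List String → List String
  | [] => []
  | h :: t =>
    if pvQual h then
      match t with
      | [] => [h]
      | t1 :: t2 => (h ++ "\nObservation: " ++ t1) :: pvGreedy t2
    else h :: pvGreedy t

-- any(... for a, b in zip(messages, messages[1:]))
def pvHasAdj : List (List (String × String)) → Bool
  | m1 :: m2 :: rest => (pvKey m1 && pvKey m2) || pvHasAdj (m2 :: rest)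
  | _ => false

-- _rebuild: one leading block at a time (the while loop over i is takeWhile/dropWhile)
def pvRebuild : List (List (String × String)) → List (List (String × String))
  | [] => []
  | m :: rest =>
    if pvKey m then
      pvAsst (pvGreedy ((m :: rest.takeWhile pvKey).map pvContent)) :: pvRebuild (rest.dropWhile pvKey)
    else m :: pvRebuild rest
termination_by ms => ms.length
decreasing_by
  · simpa using Nat.lt_succ_of_le (List.length_dropWhile_le pvKey rest)
  · simp

def refine_messages_alt (messages : List (List (String × String))) (mark_idx : Int) : List (List (String × String)) :=
  if mark_idx == 4 || mark_idx == 5 then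
    [PySem.List.pyGetD messages 0 [],
     [("role", "user"), ("content", "Diagnosed Root Causes: " ++ pvContent (PySem.List.pyGetD messages 1 []) ++ "\n\n" ++ pvContent (PySem.List.pyGetD messages 2 []))]]
  else if mark_idx == 7 then
    if pvRole (PySem.List.pyGetD messages 1 []) != "assistant" then messages
    else
      [PySem.List.pyGetD messages 0 [],
       [("role", "user"), ("content", "# Diagnosis Results\n\n" ++ pvJoin ((PySem.List.slice messages (some 1) none).map pvContent))]]
  else if mark_idx == 8 || mark_idx == 9 || mark_idx == 10 then
    [PySem.List.pyGetD messages 0 [],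
     [("role", "user"), ("content", pvJoin ((PySem.List.slice messages (some 1) none).map pvContent))]]
  else
    if pvHasAdj messages then pvRebuild messages else messages

-- ===== PRECONDITION & SPEC =====
def pvHasKey (m : List (String × String)) (k : String) : Prop :=
  (PySem.Dict.get? (PySem.Dict.mk m) k).isSome = true

-- Pre_ excludes exactly the inputs where A raises: IndexError (messages too short for the
-- indexed branches) or KeyError (a "role"/"content" lookup the taken branch performs is missing).
def Pre_refine_messages (messages : List (List (String × String))) (mark_idx : Int) : Prop :=
  if mark_idx = 4 ∨ mark_idx = 5 then
    3 ≤ messages.length ∧ pvHasKey (messages.getD 1 []) "content" ∧ pvHasKey (messages.getD 2 []) "content"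
  else if mark_idx = 7 then
    2 ≤ messages.length ∧ pvHasKey (messages.getD 1 []) "role" ∧
      (pvRole (messages.getD 1 []) = "assistant" → ∀ m ∈ messages.drop 1, pvHasKey m "content")
  else if mark_idx = 8 ∨ mark_idx = 9 ∨ mark_idx = 10 then
    1 ≤ messages.length ∧ ∀ m ∈ messages.drop 1, pvHasKey m "content"
  else
    ∀ m ∈ messages, pvHasKey m "role" ∧ (pvRole m = "assistant" → pvHasKey m "content")

instance (messages : List (List (String × String))) (mark_idx : Int) : Decidable (Pre_refine_messages messages mark_idx) := by
  unfold Pre_refine_messages pvHasKey; infer_instance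

def pvWitness_refine_messages : (List (List (String × String))) × Int :=
  ([[("role", "user"), ("content", "q")],
    [("role", "assistant"), ("content", "Thought: a")],
    [("role", "assistant"), ("content", "done")]], 0)

def Spec_refine_messages (messages : List (List (String × String))) (mark_idx : Int) (out : List (List (String × String))) : Prop := out = refine_messages_alt messages mark_idx
instance (messages : List (List (String × String))) (mark_idx : Int) (out : List (List (String × String))) : Decidable (Spec_refine_messages messages mark_idx out) := by unfold Spec_refine_messages; infer_instance

-- ===== CLAIM (what is proved, stated in full; the proofs are below) =====
def Claim_equal_refine_messages : Prop := ∀ (messages : List (List (String × String))) (mark_idx : Int), Dom_refine_messages messages mark_idx → Pre_refine_messages messages mark_idx → Spec_refine_messages messages mark_idx (refine_messages messages mark_idx)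

-- ===== LEMMAS AND PROOFS =====

-- a merged entry always contains "Observation: ", so it never qualifies again
theorem pvQual_merged (x y : String) : pvQual (x ++ "\nObservation: " ++ y) = false := by
  have hin : PySem.Str.find (x ++ "\nObservation: " ++ y) "Observation: " ≠ -1 := by
    rw [PySem.Str.find_ne_neg_one_iff]
    exact ⟨x.toList ++ ['\n'], y.toList, by simp⟩
  have hb : (PySem.Str.find (x ++ "\nObservation: " ++ y) "Observation: " == -1) = false :=
    beq_eq_false_iff_ne.mpr hin
  simp only [pvQual, hb, Bool.and_false]

theorem pvMergeStep_append (acc : List String) (c : String)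
    (h : acc = [] ∨ pvQual (acc.getLastD "") = false) :
    pvMergeStep acc c = acc ++ [c] := by
  rcases h with h | h
  · simp [pvMergeStep, h]
  · have h' : pvQual (acc.getLast?.getD "") = false := by
      rwa [← List.getLastD_eq_getLast?]
    simp [pvMergeStep, h']

-- A's in-run fold of the merge rule equals B's greedy pairwise merge
theorem pvFold_merge (cs : List String) :
    ∀ acc : List String, (acc = [] ∨ pvQual (acc.getLastD "") = false) →
      cs.foldl pvMergeStep acc = acc ++ pvGreedy cs := by
  induction cs using pvGreedy.induct with
  | case1 => intro acc _; simp [pvGreedy]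
  | case2 h hq =>
    intro acc hacc
    simp only [List.foldl_cons, List.foldl_nil, pvMergeStep_append acc h hacc, pvGreedy, hq, if_true]
  | case3 h hq t1 t2 ih =>
    intro acc hacc
    have h2 : pvMergeStep (acc ++ [h]) t1 = acc ++ [h ++ "\nObservation: " ++ t1] := by
      simp [pvMergeStep, hq]
    rw [List.foldl_cons, pvMergeStep_append acc h hacc, List.foldl_cons, h2,
        ih _ (Or.inr (by simp [pvQual_merged]))]
    conv_rhs => rw [pvGreedy.eq_def]
    simp [hq]
  | case4 h t hq ih =>
    intro acc hacc
    rw [List.foldl_cons, pvMergeStep_append acc h hacc, ih _ (Or.inr (by simp [hq]))]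
    conv_rhs => rw [pvGreedy.eq_def]
    simp [hq]

-- folding A's step over an all-assistant run only grows cnt and contents
theorem pvFoldA_run (run : List (List (String × String))) :
    ∀ (nm : List (List (String × String))) (cnt : Int) (contents : List String) (flag : Bool),
      (∀ m ∈ run, pvKey m = true) →
      run.foldl pvStepA (nm, cnt, contents, flag)
        = (nm, cnt + run.length, run.foldl (fun c mm => pvMergeStep c (pvContent mm)) contents, flag) := by
  induction run with
  | nil => intro nm cnt contents flag _; simp
  | cons m rest ih =>
    intro nm cnt contents flag hk
    have hm : pvKey m = true := hk m List.mem_cons_self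
    rw [List.foldl_cons]
    have hstep : pvStepA (nm, cnt, contents, flag) m
        = (nm, cnt + 1, pvMergeStep contents (pvContent m), flag) := by
      simp [pvStepA, pvKey] at hm ⊢; simp [hm]
    rw [hstep, ih _ _ _ _ (fun x hx => hk x (List.mem_cons_of_mem m hx))]
    simp only [List.foldl_cons, List.length_cons, Prod.mk.injEq, true_and, and_true]
    push_cast; ring

theorem pvHasAdj_nil : pvHasAdj [] = false := rfl

theorem pvHasAdj_cons_false (m : List (String × String)) (r : List (List (String × String)))
    (h : pvKey m = false) : pvHasAdj (m :: r) = pvHasAdj r := by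
  cases r <;> simp [pvHasAdj, h]

-- hasAdj split at a maximal assistant run
theorem pvHasAdj_run (run rest' : List (List (String × String)))
    (hrun : ∀ m ∈ run, pvKey m = true)
    (hrest : rest' = [] ∨ pvKey (rest'.headD []) = false) :
    pvHasAdj (run ++ rest') = (decide (run.length > 1) || pvHasAdj rest') := by
  match run with
  | [] => simp
  | [m] =>
    rcases hrest with h | h
    · simp [h, pvHasAdj]
    · cases rest' with
      | nil => simp [pvHasAdj]
      | cons m' r =>
        simp only [List.headD_cons] at h
        simp [pvHasAdj, h]
  | m1 :: m2 :: rr =>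
    have h1 : pvKey m1 = true := hrun m1 List.mem_cons_self
    have h2 : pvKey m2 = true := hrun m2 (by simp)
    simp [pvHasAdj, h1, h2]

theorem pvRebuild_nil : pvRebuild [] = [] := by rw [pvRebuild]

theorem pvRebuild_cons_false (m : List (String × String)) (rest : List (List (String × String)))
    (h : pvKey m = false) : pvRebuild (m :: rest) = m :: pvRebuild rest := by
  rw [pvRebuild]; simp [h]

theorem pvRebuild_cons_true (m : List (String × String)) (rest : List (List (String × String)))
    (h : pvKey m = true) :
    pvRebuild (m :: rest)
      = pvAsst (pvGreedy ((m :: rest.takeWhile pvKey).map pvContent)) :: pvRebuild (rest.dropWhile pvKey) := by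
  rw [pvRebuild]; simp [h]

-- the head of dropWhile fails the predicate
theorem pvDropWhile_head (l : List (List (String × String))) :
    l.dropWhile pvKey = [] ∨ pvKey ((l.dropWhile pvKey).headD []) = false := by
  induction l with
  | nil => exact Or.inl rfl
  | cons a b ihb =>
    by_cases ha : pvKey a = true
    · simpa [List.dropWhile_cons, ha] using ihb
    · right
      rw [Bool.not_eq_true] at ha
      simp [ha]

-- finalisation after A's loop
def pvFinA (st : List (List (String × String)) × Int × List String × Bool) :
    List (List (String × String)) × Bool :=
  let (nm, cnt, contents, flag) := st
  (if cnt > 0 then nm ++ [pvAsst contents] else nm,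
   if cnt > 0 then flag || decide (cnt > 1) else flag)

theorem pvDecideCast (n : Nat) : decide ((1:Int) < (n:Int)) = decide (1 < n) := by simp

-- MAIN: A's finalised loop = (append of B's rebuild, pairing of B's adjacency flag)
theorem pvMain (n : Nat) : ∀ (ms : List (List (String × String))), ms.length ≤ n →
    ∀ (nm : List (List (String × String))) (flag : Bool),
      pvFinA (ms.foldl pvStepA (nm, 0, [], flag)) = (nm ++ pvRebuild ms, flag || pvHasAdj ms) := by
  induction n with
  | zero =>
    intro ms hlen nm flag
    rw [List.length_eq_zero_iff.mp (Nat.le_zero.mp hlen)]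
    simp [pvFinA, pvRebuild_nil, pvHasAdj_nil]
  | succ n ih =>
    intro ms hlen nm flag
    match ms with
    | [] => simp [pvFinA, pvRebuild_nil, pvHasAdj_nil]
    | m :: rest =>
      by_cases hk : pvKey m = true
      · -- leading assistant run
        obtain ⟨run, hrundef⟩ : ∃ run, m :: rest.takeWhile pvKey = run := ⟨_, rfl⟩
        obtain ⟨rest', hrestdef⟩ : ∃ r', rest.dropWhile pvKey = r' := ⟨_, rfl⟩
        have hsplit : m :: rest = run ++ rest' := by
          rw [← hrundef, ← hrestdef]
          simp [List.takeWhile_append_dropWhile]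
        have hrunkey : ∀ x ∈ run, pvKey x = true := by
          intro x hx
          rw [← hrundef] at hx
          rcases List.mem_cons.mp hx with h | h
          · exact h ▸ hk
          · exact List.mem_takeWhile_imp h
        have hlenrun : 1 ≤ run.length := by rw [← hrundef]; simp
        have hrest : rest' = [] ∨ pvKey (rest'.headD []) = false := by
          rw [← hrestdef]; exact pvDropWhile_head rest
        have hC : run.foldl (fun c mm => pvMergeStep c (pvContent mm)) []
            = pvGreedy (run.map pvContent) := by
          rw [← List.foldl_map]
          simpa using pvFold_merge (run.map pvContent) [] (Or.inl rfl)
        have hRB : pvRebuild (m :: rest)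
            = pvAsst (pvGreedy (run.map pvContent)) :: pvRebuild rest' := by
          rw [pvRebuild_cons_true m rest hk, hrundef, hrestdef]
        have hAdj : pvHasAdj (m :: rest) = (decide (run.length > 1) || pvHasAdj rest') := by
          rw [hsplit]; exact pvHasAdj_run run rest' hrunkey hrest
        have hlen2 : run.length + rest'.length ≤ n + 1 := by
          have h := congrArg List.length hsplit
          simp only [List.length_cons, List.length_append] at h
          simp only [List.length_cons] at hlen
          omega
        have hpos : (0:Int) < (run.length : Int) := by exact_mod_cast hlenrun
        conv_lhs => rw [hsplit]
        rw [List.foldl_append, pvFoldA_run run nm 0 [] flag hrunkey, hRB, hAdj]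
        cases rest' with
        | nil =>
          simp only [List.foldl_nil, pvFinA, Int.zero_add]
          rw [if_pos hpos, if_pos hpos, hC, pvDecideCast, pvRebuild_nil, pvHasAdj_nil]
          simp
        | cons m' r =>
          have hkm' : pvKey m' = false := by
            rcases hrest with h | h
            · simp at h
            · simpa using h
          rw [List.foldl_cons]
          have hstep : pvStepA (nm, 0 + (run.length : Int),
              run.foldl (fun c mm => pvMergeStep c (pvContent mm)) [], flag) m'
              = ((nm ++ [pvAsst (run.foldl (fun c mm => pvMergeStep c (pvContent mm)) [])]) ++ [m'], 0, [],
                 flag || decide (run.length > 1)) := by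
            have hkm'' : (pvRole m' == "assistant") = false := hkm'
            simp only [pvStepA, hkm'', Bool.false_eq_true, if_false, Int.zero_add]
            rw [if_pos hpos, pvDecideCast]
          rw [hstep]
          have hlenr : r.length ≤ n := by
            simp only [List.length_cons] at hlen2
            omega
          rw [ih r hlenr _ _, hC, pvRebuild_cons_false m' r hkm', pvHasAdj_cons_false m' r hkm']
          simp [List.append_assoc, Bool.or_assoc]
      · -- non-assistant head
        rw [Bool.not_eq_true] at hk
        have hk' : (pvRole m == "assistant") = false := hk
        have hstep : pvStepA (nm, 0, [], flag) m = (nm ++ [m], 0, [], flag) := by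
          simp [pvStepA, hk']
        rw [List.foldl_cons, hstep, ih rest (by simpa using Nat.le_of_succ_le_succ hlen) _ _,
            pvRebuild_cons_false m rest hk, pvHasAdj_cons_false m rest hk]
        simp

-- ===== VERDICT (by name: the statement is the Claim_ definition above) =====
theorem refine_messages_spec : Claim_equal_refine_messages := by
  intro messages mark_idx _dom _pre
  unfold Spec_refine_messages refine_messages refine_messages_alt
  by_cases h45 : (mark_idx == 4 || mark_idx == 5) = true
  · simp only [h45, if_true]
  simp only [h45, Bool.false_eq_true, if_false]
  by_cases h7 : (mark_idx == 7) = true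
  · simp only [h7, if_true]
  simp only [h7, Bool.false_eq_true, if_false]
  by_cases h8 : (mark_idx == 8 || mark_idx == 9 || mark_idx == 10) = true
  · simp only [h8, if_true]
  simp only [h8, Bool.false_eq_true, if_false]
  have h := pvMain messages.length messages (Nat.le_refl _) [] false
  rcases hA : messages.foldl pvStepA ([], 0, [], false) with ⟨nm, cnt, contents, flag⟩
  rw [hA] at h
  simp only [pvFinA, Bool.false_or, List.nil_append, Prod.mk.injEq] at h
  obtain ⟨h1, h2⟩ := h
  dsimp only
  rw [h1, h2]
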